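-- pv_equiv track=rewrite | github.com/MrBrantCode/unitest_baseline | mut_generate/mist_train_taco/taco_8757/solution.py | count_weird_subarrays
-- ===== SOURCE A (Python) =====
-- def count_weird_subarrays(P, N):
--     if N == 1:
--         return 1
--     elif N == 2:
--         return 3
--     else:
--         C = 2
--         F = P[1] > P[0]
--         final = 0
--         for i in range(2, N):
--             if not F or (F and P[i] > P[i - 1]):
--                 if not F and P[i] > P[i - 1]:
--                     F = True
--                 C += 1
--             else:
--                 final += C * (C + 1) // 2
--                 if final > C * (C + 1) // 2:
--                     final -= 1
--                 C = 2
--                 F ^= True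
--         if C > 0:
--             final += C * (C + 1) // 2
--             if final > C * (C + 1) // 2:
--                 final -= 1
--         return final
-- ===== SOURCE B (Python) =====
-- def count_weird_subarrays(P, N):
--     if N == 1:
--         return 1
--     if N == 2:
--         return 3
--     # DP: total = number of 'weird' (valley: non-increasing then strictly
--     # increasing) subarrays ending at each index, summed as we go.
--     total = 3                       # index 0 contributes 1, index 1 contributes 2
--     dec = 2 if P[1] <= P[0] else 1  # length of longest non-increasing suffix
--     best = 2                        # length of longest valley suffix
--     for i in range(2, N):
--         if P[i] > P[i - 1]:
--             dec = 1
--             best = best + 1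
--         else:
--             dec = dec + 1
--             best = dec
--         total += best
--     return total
-- ===== Notes on version B (the rewrite author's own statement) =====
-- stated objective: simpler
-- what changed: Replaces A's run segmentation with triangular-number sums and a conditional -1 correction by a per-index DP that tracks the longest non-increasing and longest valley suffix lengths and simply sums, for each position, the count of weird subarrays ending there.
import Mathlib
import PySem

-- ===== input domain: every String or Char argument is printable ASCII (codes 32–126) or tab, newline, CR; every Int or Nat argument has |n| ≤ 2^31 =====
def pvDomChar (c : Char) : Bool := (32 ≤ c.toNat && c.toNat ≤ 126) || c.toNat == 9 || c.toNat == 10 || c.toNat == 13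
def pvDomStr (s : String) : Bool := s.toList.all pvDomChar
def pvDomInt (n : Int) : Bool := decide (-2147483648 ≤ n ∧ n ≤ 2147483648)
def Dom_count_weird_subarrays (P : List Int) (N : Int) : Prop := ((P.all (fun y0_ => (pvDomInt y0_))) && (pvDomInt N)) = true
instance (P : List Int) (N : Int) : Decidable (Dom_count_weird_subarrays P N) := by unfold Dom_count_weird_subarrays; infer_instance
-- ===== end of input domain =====

-- B replaces A's run segmentation with triangular sums and a conditional -1 correction by a
-- per-index DP that sums, for each position, the number of weird subarrays ending there
-- (objective: simpler decomposition, same O(N) cost).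


-- c*(c+1)//2, exactly the expression A computes
def pvTri (c : Int) : Int := PySem.Int.floordiv (c * (c + 1)) 2

-- ===== PORT A =====
-- one loop iteration of A: state (C, F, final)
def pvStepA (P : List Int) (st : Int × Bool × Int) (i : Int) : Int × Bool × Int :=
  match st with
  | (C, F, final) =>
    if !F || (F && decide (PySem.List.pyGetD P i 0 > PySem.List.pyGetD P (i - 1) 0)) then
      (C + 1,
       (if !F && decide (PySem.List.pyGetD P i 0 > PySem.List.pyGetD P (i - 1) 0) then true else F),
       final)
    else
      (2, !F, if final + pvTri C > pvTri C then final + pvTri C - 1 else final + pvTri C)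

def count_weird_subarrays (P : List Int) (N : Int) : Int :=
  if N = 1 then 1
  else if N = 2 then 3
  else
    let s := (PySem.List.pyRange 2 N 1).foldl (pvStepA P)
      (2, decide (PySem.List.pyGetD P 1 0 > PySem.List.pyGetD P 0 0), 0)
    if s.1 > 0 then
      (if s.2.2 + pvTri s.1 > pvTri s.1 then s.2.2 + pvTri s.1 - 1 else s.2.2 + pvTri s.1)
    else s.2.2

-- ===== PORT B =====
-- one loop iteration of B: state (total, dec, best)
def pvStepB (P : List Int) (st : Int × Int × Int) (i : Int) : Int × Int × Int :=
  match st with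
  | (total, dec, best) =>
    if decide (PySem.List.pyGetD P i 0 > PySem.List.pyGetD P (i - 1) 0) then
      (total + (best + 1), 1, best + 1)
    else
      (total + (dec + 1), dec + 1, dec + 1)

def count_weird_subarrays_alt (P : List Int) (N : Int) : Int :=
  if N = 1 then 1
  else if N = 2 then 3
  else
    let s := (PySem.List.pyRange 2 N 1).foldl (pvStepB P)
      (3, (if PySem.List.pyGetD P 1 0 ≤ PySem.List.pyGetD P 0 0 then 2 else 1), 2)
    s.1

-- ===== PRECONDITION & SPEC =====
-- Pre_ excludes exactly the inputs where Python A raises IndexError: N ≥ 3 needs P[0..N-1],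
-- and N ≤ 0 still evaluates P[1] > P[0], so the list must have length ≥ 2 there.
def Pre_count_weird_subarrays (P : List Int) (N : Int) : Prop :=
  N = 1 ∨ N = 2 ∨ ((2 : Int) ≤ (P.length : Int) ∧ N ≤ (P.length : Int))
instance (P : List Int) (N : Int) : Decidable (Pre_count_weird_subarrays P N) := by
  unfold Pre_count_weird_subarrays; infer_instance

def pvWitness_count_weird_subarrays : List Int × Int := ([3, 1, 2, 5, 4], 5)

def Spec_count_weird_subarrays (P : List Int) (N : Int) (out : Int) : Prop := out = count_weird_subarrays_alt P N
instance (P : List Int) (N : Int) (out : Int) : Decidable (Spec_count_weird_subarrays P N out) := by unfold Spec_count_weird_subarrays; infer_instance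

-- ===== CLAIM (what is proved, stated in full; the proofs are below) =====
def Claim_equal_count_weird_subarrays : Prop := ∀ (P : List Int) (N : Int), Dom_count_weird_subarrays P N → Pre_count_weird_subarrays P N → Spec_count_weird_subarrays P N (count_weird_subarrays P N)

-- ===== LEMMAS AND PROOFS =====

lemma pvTri_succ (c : Int) : pvTri (c + 1) = pvTri c + (c + 1) := by
  unfold pvTri
  rw [PySem.Int.floordiv_eq_ediv_of_pos (by norm_num), PySem.Int.floordiv_eq_ediv_of_pos (by norm_num)]
  have h : (c + 1) * (c + 1 + 1) = c * (c + 1) + 2 * (c + 1) := by ring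
  rw [h]
  omega

lemma pvTri_ge_three {c : Int} (hc : 2 ≤ c) : 3 ≤ pvTri c := by
  unfold pvTri
  rw [PySem.Int.floordiv_eq_ediv_of_pos (by norm_num)]
  have h6 : (6 : Int) ≤ c * (c + 1) := by nlinarith
  omega

-- the loop invariant relating A's state (C, F, final) to B's state (total, dec, best)
def pvInv (a : Int × Bool × Int) (b : Int × Int × Int) : Prop :=
  2 ≤ a.1 ∧ 0 ≤ a.2.2 ∧ b.2.2 = a.1 ∧ b.2.1 = (if a.2.1 then 1 else a.1) ∧
  b.1 = a.2.2 + pvTri a.1 - (if 0 < a.2.2 then 1 else 0)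

lemma pv_loop_inv (P : List Int) (L : List Int) :
    ∀ (a : Int × Bool × Int) (b : Int × Int × Int), pvInv a b →
    pvInv (L.foldl (pvStepA P) a) (L.foldl (pvStepB P) b) := by
  induction L with
  | nil => intro a b h; exact h
  | cons i t ih =>
    intro a b h
    simp only [List.foldl_cons]
    apply ih
    unfold pvInv at h ⊢
    obtain ⟨hC, hfin, hbest, hdec, htot⟩ := h
    by_cases hinc : PySem.List.pyGetD P i 0 > PySem.List.pyGetD P (i - 1) 0
    · -- increasing step: A extends the run, B extends the valley
      have hA : pvStepA P a i = (a.1 + 1, (if !a.2.1 then true else a.2.1), a.2.2) := by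
        cases hF : a.2.1 <;> simp [pvStepA, hinc, hF]
      have hB : pvStepB P b i = (b.1 + (b.2.2 + 1), 1, b.2.2 + 1) := by
        simp [pvStepB, hinc]
      rw [hA, hB]
      refine ⟨by dsimp; omega, hfin, by dsimp; omega, by cases a.2.1 <;> simp, ?_⟩
      dsimp
      rw [pvTri_succ]
      omega
    · by_cases hF : a.2.1 = true
      · -- close the run: A applies its conditional -1, B restarts from the non-increasing suffix
        have hA : pvStepA P a i =
            (2, !a.2.1, if a.2.2 + pvTri a.1 > pvTri a.1 then a.2.2 + pvTri a.1 - 1 else a.2.2 + pvTri a.1) := by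
          simp [pvStepA, hinc, hF]
        have hB : pvStepB P b i = (b.1 + (b.2.1 + 1), b.2.1 + 1, b.2.1 + 1) := by
          simp [pvStepB, hinc]
        rw [hA, hB]
        have h3 := pvTri_ge_three hC
        rw [hF] at hdec
        simp only [hdec, hF]
        refine ⟨by norm_num, by split <;> omega, by norm_num, by norm_num, ?_⟩
        dsimp
        have ht2 : pvTri 2 = 3 := by decide
        rw [ht2]
        omega
      · -- non-increasing step while still descending: both extend
        have hF' : a.2.1 = false := by cases h : a.2.1 <;> simp_all
        have hA : pvStepA P a i = (a.1 + 1, a.2.1, a.2.2) := by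
          simp [pvStepA, hinc, hF']
        have hB : pvStepB P b i = (b.1 + (b.2.1 + 1), b.2.1 + 1, b.2.1 + 1) := by
          simp [pvStepB, hinc]
        rw [hA, hB]
        rw [hF'] at hdec ⊢
        simp only [Bool.false_eq_true, if_false] at hdec
        refine ⟨?_, hfin, ?_, ?_, ?_⟩
        · show 2 ≤ a.1 + 1
          omega
        · show b.2.1 + 1 = a.1 + 1
          omega
        · show b.2.1 + 1 = if false = true then 1 else a.1 + 1
          simp only [Bool.false_eq_true, if_false]
          omega
        · show b.1 + (b.2.1 + 1) = a.2.2 + pvTri (a.1 + 1) - (if 0 < a.2.2 then 1 else 0)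
          rw [pvTri_succ]
          omega

-- ===== VERDICT (by name: the statement is the Claim_ definition above) =====
theorem count_weird_subarrays_spec : Claim_equal_count_weird_subarrays := by
  intro P N _ _
  unfold Spec_count_weird_subarrays count_weird_subarrays count_weird_subarrays_alt
  by_cases h1 : N = 1
  · simp [h1]
  by_cases h2 : N = 2
  · simp [h2]
  rw [if_neg h1, if_neg h2, if_neg h1, if_neg h2]
  dsimp only
  have hinit : pvInv (2, decide (PySem.List.pyGetD P 1 0 > PySem.List.pyGetD P 0 0), 0)
      (3, (if PySem.List.pyGetD P 1 0 ≤ PySem.List.pyGetD P 0 0 then 2 else 1), 2) := by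
    have ht2 : pvTri 2 = 3 := by decide
    refine ⟨by norm_num, le_refl 0, rfl, ?_, by simp [ht2]⟩
    by_cases h : PySem.List.pyGetD P 1 0 > PySem.List.pyGetD P 0 0 <;> simp [h]
  have hfold := pv_loop_inv P (PySem.List.pyRange 2 N 1) _ _ hinit
  set sA := (PySem.List.pyRange 2 N 1).foldl (pvStepA P)
    (2, decide (PySem.List.pyGetD P 1 0 > PySem.List.pyGetD P 0 0), 0) with hsA
  set sB := (PySem.List.pyRange 2 N 1).foldl (pvStepB P)
    (3, (if PySem.List.pyGetD P 1 0 ≤ PySem.List.pyGetD P 0 0 then 2 else 1), 2) with hsB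
  obtain ⟨hC, hfin, _, _, htot⟩ := hfold
  rw [if_pos (by omega)]
  have h3 := pvTri_ge_three hC
  by_cases hf : 0 < sA.2.2
  · rw [if_pos (by omega)]; omega
  · rw [if_neg (by omega)]; omega
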